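-- pv_equiv track=rewrite | github.com/antoncp/training_exercises | RepeatAdjacent.py | repeat_adjacent
-- ===== SOURCE A (Python) =====
-- def repeat_adjacent(st):
--     last_group, supergroup = None, False
--     count = 0
--     for i, letter in enumerate(st[1:], 1):
--         if letter == st[i - 1]:
--             if last_group and i - last_group < 3 and st[last_group] != letter:
--                 supergroup = True
--             last_group = i
--         elif last_group and i - last_group == 2 and supergroup:
--             count += 1
--             supergroup = False
--     return count if not supergroup else count + 1
-- ===== SOURCE B (Python) =====
-- def repeat_adjacent(st):
--     n = len(st)
--     events = [i for i in range(1, n) if st[i] == st[i - 1]]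
--     count, flag, prev = 0, False, None
--     for k, g in enumerate(events):
--         if prev is not None and g - prev < 3 and st[prev] != st[g]:
--             flag = True
--         nxt = events[k + 1] if k + 1 < len(events) else None
--         if flag and g + 2 < n and (nxt is None or nxt >= g + 3):
--             count += 1
--             flag = False
--         prev = g
--     return count + (1 if flag else 0)
-- ===== Notes on version B (the rewrite author's own statement) =====
-- stated objective: alternative
-- what changed: B replaces A's single indexed scan with mutable last_group/supergroup bookkeeping by a two-pass decomposition: first collect the list of adjacent-duplicate event positions, then fold over that event list, deciding each supergroup close from the gap to the next event via lookahead.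
import Mathlib
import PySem

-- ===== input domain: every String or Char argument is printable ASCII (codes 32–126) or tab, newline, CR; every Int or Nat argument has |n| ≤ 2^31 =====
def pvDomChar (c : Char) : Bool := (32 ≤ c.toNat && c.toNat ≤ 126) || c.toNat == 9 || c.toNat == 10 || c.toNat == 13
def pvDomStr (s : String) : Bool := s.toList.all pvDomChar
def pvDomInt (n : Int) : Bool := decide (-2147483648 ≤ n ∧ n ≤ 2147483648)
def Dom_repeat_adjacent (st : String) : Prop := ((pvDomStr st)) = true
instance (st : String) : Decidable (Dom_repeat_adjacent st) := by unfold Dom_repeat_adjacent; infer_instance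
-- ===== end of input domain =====

-- B re-decomposes the single indexed scan into two passes: collect adjacent-duplicate event
-- positions, then fold over the event list with a lookahead at the next event (objective:
-- alternative decomposition, same asymptotic cost).

-- ===== PORT A =====
-- loop body of A's for-loop (state: last_group, supergroup, count; item: (i, letter))
def raStepA (cs : List Char) (s : Option Int × Bool × Int) (p : Int × Char) :
    Option Int × Bool × Int :=
  let lg := s.1; let sg := s.2.1; let cnt := s.2.2
  let i := p.1; let letter := p.2
  if (PySem.List.pyGet? cs (i - 1)).any (fun c => letter == c) then
    (some i,
     (if (lg.elim false (fun g => g != 0 && decide (i - g < 3) &&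
              ((PySem.List.pyGet? cs g).any (fun c => !(c == letter))))) then true else sg),
     cnt)
  else if ((lg.elim false (fun g => g != 0 && (i - g == 2))) && sg) then
    (lg, false, cnt + 1)
  else s

def repeat_adjacent (st : String) : Int :=
  let cs := st.toList
  let r := (PySem.List.enumerate (PySem.List.slice cs (some 1) none) 1).foldl
      (raStepA cs) (none, false, 0)
  if !r.2.1 then r.2.2 else r.2.2 + 1

-- ===== PORT B =====
-- event test: st[i] == st[i-1]
def raEv (cs : List Char) (i : Int) : Bool :=
  (PySem.List.pyGet? cs i).any (fun c => (PySem.List.pyGet? cs (i - 1)).any (fun c' => c == c'))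

-- B's loop over the event list; nxt = head of the remaining events (= events[k+1])
def raGoB (cs : List Char) (n : Int) : List Int → Option Int → Bool → Int → Int
  | [], _, flag, count => count + (if flag then 1 else 0)
  | g :: rest, prev, flag, count =>
    let flag1 := if (prev.elim false (fun p => decide (g - p < 3) &&
            ((PySem.List.pyGet? cs p).any (fun cp =>
              (PySem.List.pyGet? cs g).any (fun cg => !(cp == cg)))))) then true else flag
    if flag1 && decide (g + 2 < n) &&
        (rest.head?.elim true (fun m => decide (g + 3 ≤ m))) then
      raGoB cs n rest (some g) false (count + 1)
    else
      raGoB cs n rest (some g) flag1 count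

def repeat_adjacent_alt (st : String) : Int :=
  let cs := st.toList
  let n : Int := cs.length
  let events := (PySem.List.pyRange 1 n 1).filter (raEv cs)
  raGoB cs n events none false 0

-- ===== PRECONDITION & SPEC =====
def Spec_repeat_adjacent (st : String) (out : Int) : Prop := out = repeat_adjacent_alt st
instance (st : String) (out : Int) : Decidable (Spec_repeat_adjacent st out) := by unfold Spec_repeat_adjacent; infer_instance

-- ===== CLAIM (what is proved, stated in full; the proofs are below) =====
def Claim_equal_repeat_adjacent : Prop := ∀ (st : String), Dom_repeat_adjacent st → Spec_repeat_adjacent st (repeat_adjacent st)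

-- ===== LEMMAS AND PROOFS =====

-- a "supergroup close" is pending: the flag is set, the last event is g, position i has not
-- passed g+2, and A will in fact close at g+2 (g+2 in range, g+1 and g+2 are not events)
def raPend (cs : List Char) (i : Int) (lg : Option Int) (sg : Bool) : Prop :=
  sg = true ∧ ∃ g, lg = some g ∧ i ≤ g + 2 ∧ g + 2 < (cs.length : Int) ∧
    raEv cs (g + 1) = false ∧ raEv cs (g + 2) = false

-- simulation invariant between A's state after indices < i and B's state after events < i
def raInv (cs : List Char) (i : Int) (lg : Option Int) (sg : Bool) (cnt : Int)
    (prev : Option Int) (flag : Bool) (count : Int) : Prop :=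
  prev = lg ∧
  (∀ g, lg = some g → 1 ≤ g ∧ g < i ∧ raEv cs g = true ∧
      ∀ j, g < j → j < i → raEv cs j = false) ∧
  (raPend cs i lg sg → count = cnt + 1 ∧ flag = false) ∧
  (¬ raPend cs i lg sg → count = cnt ∧ flag = sg)

lemma raEv_lt_length (cs : List Char) (i : Int) (h1 : 0 ≤ i) (h : raEv cs i = true) :
    i < (cs.length : Int) := by
  by_contra hlt
  have hi : i = (i.toNat : Int) := by omega
  rw [hi] at h
  rw [raEv, PySem.List.pyGet?_natCast, List.getElem?_eq_none (by omega)] at h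
  simp at h

lemma raEv_in_range (cs : List Char) (k : Nat) (hk : k < cs.length) :
    raEv cs (k : Int) = (PySem.List.pyGet? cs ((k : Int) - 1)).any (fun c' => cs[k] == c') := by
  simp [raEv, PySem.List.pyGet?_natCast, List.getElem?_eq_getElem hk]

lemma raNxt (cs : List Char) (k : Int) (hk : 0 ≤ k) :
    (((PySem.List.pyRange (k + 1) (cs.length : Int) 1).filter (raEv cs)).head?.elim true
      (fun m => decide (k + 3 ≤ m))) =
    (!raEv cs (k + 1) && !raEv cs (k + 2)) := by
  set n : Int := (cs.length : Int) with hn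
  by_cases h1 : k + 1 < n
  · rw [PySem.List.pyRange_one_cons h1]
    by_cases he1 : raEv cs (k + 1) = true
    · simp [he1]
    · replace he1 : raEv cs (k + 1) = false := by
        cases h : raEv cs (k + 1)
        · rfl
        · exact absurd h he1
      rw [List.filter_cons]
      simp only [he1, Bool.false_eq_true, ite_false]
      by_cases h2 : k + 2 < n
      · rw [show k + 1 + 1 = k + 2 by ring, PySem.List.pyRange_one_cons h2]
        by_cases he2 : raEv cs (k + 2) = true
        · simp [he2]
        · replace he2 : raEv cs (k + 2) = false := by
            cases h : raEv cs (k + 2)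
            · rfl
            · exact absurd h he2
          rw [List.filter_cons]
          simp only [he2, Bool.false_eq_true, ite_false]
          cases hh : ((PySem.List.pyRange (k + 2 + 1) n 1).filter (raEv cs)).head? with
          | none => simp
          | some m =>
            have hm : m ∈ (PySem.List.pyRange (k + 2 + 1) n 1).filter (raEv cs) :=
              List.mem_of_mem_head? hh
            have := PySem.List.mem_pyRange_one.mp (List.mem_filter.mp hm).1
            simp; omega
      · have he2 : raEv cs (k + 2) = false := by
          by_contra hc
          have := raEv_lt_length cs (k + 2) (by omega) (by simpa using hc)
          omega
        rw [show k + 1 + 1 = k + 2 by ring, PySem.List.pyRange_one_eq_nil (by omega)]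
        simp [he2]
  · have he1 : raEv cs (k + 1) = false := by
      by_contra hc
      have := raEv_lt_length cs (k + 1) (by omega) (by simpa using hc)
      omega
    have he2 : raEv cs (k + 2) = false := by
      by_contra hc
      have := raEv_lt_length cs (k + 2) (by omega) (by simpa using hc)
      omega
    rw [PySem.List.pyRange_one_eq_nil (by omega)]
    simp [he1, he2]

def raFin (r : Option Int × Bool × Int) : Int :=
  if !r.2.1 then r.2.2 else r.2.2 + 1

lemma raMain (cs : List Char) : ∀ (m k : Nat), cs.length = k + m → 1 ≤ k →
    ∀ (lg prev : Option Int) (sg flag : Bool) (cnt count : Int),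
    raInv cs (k : Int) lg sg cnt prev flag count →
    raFin ((PySem.List.enumerate (cs.drop k) (k : Int)).foldl (raStepA cs) (lg, sg, cnt)) =
    raGoB cs (cs.length : Int) ((PySem.List.pyRange (k : Int) (cs.length : Int) 1).filter (raEv cs))
      prev flag count := by
  intro m
  induction m with
  | zero =>
    intro k hlen hk lg prev sg flag cnt count hinv
    obtain ⟨hprev, hlgP, hpend1, hpend2⟩ := hinv
    have hnp : ¬ raPend cs (k : Int) lg sg := by
      rintro ⟨hsg, g, hg, hle, hlt, h1, h2⟩
      obtain ⟨hg1, hgk, hgev, hgap⟩ := hlgP g hg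
      omega
    obtain ⟨hcount, hflag⟩ := hpend2 hnp
    rw [List.drop_eq_nil_of_le (by omega), PySem.List.enumerate_nil,
      PySem.List.pyRange_one_eq_nil (by omega)]
    simp only [List.foldl_nil, List.filter_nil, raGoB, raFin]
    rw [hcount, hflag]
    cases sg <;> simp
  | succ m ih =>
    intro k hlen hk lg prev sg flag cnt count hinv
    obtain ⟨hprev, hlgP, hpend1, hpend2⟩ := hinv
    replace hprev : lg = prev := hprev.symm
    subst hprev
    have hkn : k < cs.length := by omega
    have hknI : (k : Int) < (cs.length : Int) := by exact_mod_cast hkn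
    have hcast : ((k + 1 : Nat) : Int) = (k : Int) + 1 := by push_cast; ring
    have hgetk : PySem.List.pyGet? cs (k : Int) = some cs[k] := by
      rw [PySem.List.pyGet?_natCast, List.getElem?_eq_getElem hkn]
    rw [List.drop_eq_getElem_cons hkn, PySem.List.enumerate_cons, List.foldl_cons,
      PySem.List.pyRange_one_cons hknI, List.filter_cons]
    have htest : ((PySem.List.pyGet? cs ((k : Int) - 1)).any (fun c => cs[k] == c))
        = raEv cs (k : Int) := (raEv_in_range cs k hkn).symm
    by_cases hev : raEv cs (k : Int) = true
    · -- ===== event at position k =====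
      have hnp : ¬ raPend cs (k : Int) lg sg := by
        rintro ⟨hsg, g, hg, hle, hlt, h1, h2⟩
        obtain ⟨hg1, hgk, hgev, hgap⟩ := hlgP g hg
        have : (k : Int) = g + 1 ∨ (k : Int) = g + 2 := by omega
        rcases this with h | h <;> rw [h] at hev
        · rw [h1] at hev; exact absurd hev (by simp)
        · rw [h2] at hev; exact absurd hev (by simp)
      obtain ⟨hcount, hflag⟩ := hpend2 hnp
      have hcond : (lg.elim false (fun p => decide ((k : Int) - p < 3) &&
                ((PySem.List.pyGet? cs p).any (fun cp =>
                  (PySem.List.pyGet? cs (k : Int)).any (fun cg => !(cp == cg))))))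
          = (lg.elim false (fun g => g != 0 && decide ((k : Int) - g < 3) &&
                ((PySem.List.pyGet? cs g).any (fun c => !(c == cs[k]))))) := by
        cases lg with
        | none => rfl
        | some g =>
          obtain ⟨hg1, hgk, hgev, hgap⟩ := hlgP g rfl
          have hgne : (g != 0) = true := by simp; omega
          simp only [Option.elim_some, hgetk, Option.any_some, hgne, Bool.true_and]
      rw [if_pos hev]
      simp only [raStepA, htest, hev, if_true, raGoB, hflag, hcond]
      rw [raNxt cs (k : Int) (by positivity)]
      generalize hSG : (if (lg.elim false (fun g => g != 0 && decide ((k : Int) - g < 3) &&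
                ((PySem.List.pyGet? cs g).any (fun c => !(c == cs[k]))))) = true
          then true else sg) = sgN
      by_cases hcl : (sgN && decide ((k : Int) + 2 < (cs.length : Int)) &&
          (!raEv cs ((k : Int) + 1) && !raEv cs ((k : Int) + 2))) = true
      · rw [if_pos hcl]
        have hcl' := hcl
        simp only [Bool.and_eq_true, Bool.not_eq_true', decide_eq_true_eq] at hcl'
        have hinv' : raInv cs ((k + 1 : Nat) : Int) (some (k : Int)) sgN cnt
            (some (k : Int)) false (count + 1) := by
          refine ⟨rfl, ?_, ?_, ?_⟩
          · rintro g hg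
            injection hg with hg
            subst hg
            exact ⟨by omega, by push_cast; omega, hev, by intro j h1 h2; omega⟩
          · intro _; exact ⟨by omega, rfl⟩
          · rintro hnp'
            exact absurd ⟨hcl'.1.1, (k : Int), rfl, by omega, hcl'.1.2,
              hcl'.2.1, hcl'.2.2⟩ hnp'
        have := ih (k + 1) (by omega) (by omega) (some (k : Int)) (some (k : Int))
          sgN false cnt (count + 1) hinv'
        rw [hcast] at this
        rw [this]
      · rw [if_neg hcl]
        have hinv' : raInv cs ((k + 1 : Nat) : Int) (some (k : Int)) sgN cnt
            (some (k : Int)) sgN count := by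
          refine ⟨rfl, ?_, ?_, ?_⟩
          · rintro g hg
            injection hg with hg
            subst hg
            exact ⟨by omega, by push_cast; omega, hev, by intro j h1 h2; omega⟩
          · rintro ⟨hsg, g, hg, hle, hlt, h1, h2⟩
            injection hg with hg
            subst hg
            exact absurd (by simp [hsg, h1, h2]; omega) hcl
          · intro _; exact ⟨hcount, rfl⟩
        have := ih (k + 1) (by omega) (by omega) (some (k : Int)) (some (k : Int))
          sgN sgN cnt count hinv'
        rw [hcast] at this
        rw [this]
    · -- ===== no event at position k =====
      have hevF : raEv cs (k : Int) = false := by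
        cases h : raEv cs (k : Int)
        · rfl
        · exact absurd h hev
      rw [if_neg (by simp [hevF])]
      simp only [raStepA, htest, hevF, Bool.false_eq_true, if_false]
      by_cases hfire : ((lg.elim false (fun g => g != 0 && ((k : Int) - g == 2))) && sg) = true
      · -- A closes the supergroup here
        rw [if_pos hfire]
        obtain ⟨g, hg⟩ : ∃ g, lg = some g := by
          cases lg with
          | none => simp at hfire
          | some g => exact ⟨g, rfl⟩
        subst hg
        simp only [Option.elim_some, Bool.and_eq_true, bne_iff_ne, ne_eq, beq_iff_eq] at hfire
        obtain ⟨⟨hgne, hgk2⟩, hsg⟩ := hfire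
        obtain ⟨hg1, hgk, hgev, hgap⟩ := hlgP g rfl
        have hp : raPend cs (k : Int) (some g) sg :=
          ⟨hsg, g, rfl, by omega, by omega,
           hgap (g + 1) (by omega) (by omega),
           by have h2 : g + 2 = (k : Int) := by omega
              rw [h2]; exact hevF⟩
        obtain ⟨hcount, hflag⟩ := hpend1 hp
        have hinv' : raInv cs ((k + 1 : Nat) : Int) (some g) false (cnt + 1)
            (some g) flag count := by
          refine ⟨rfl, ?_, ?_, ?_⟩
          · rintro g' hg'
            injection hg' with hg'
            subst hg'
            refine ⟨hg1, by push_cast; omega, hgev, ?_⟩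
            intro j h1 h2
            by_cases hj : j = (k : Int)
            · subst hj; exact hevF
            · exact hgap j h1 (by omega)
          · rintro ⟨hsg', _⟩; exact absurd hsg' (by simp)
          · intro _; exact ⟨hcount, hflag⟩
        have := ih (k + 1) (by omega) (by omega) (some g) (some g)
          false flag (cnt + 1) count hinv'
        rw [hcast] at this
        rw [this]
      · -- A's state is unchanged
        rw [if_neg hfire]
        have hpiff : raPend cs ((k : Int) + 1) lg sg ↔ raPend cs (k : Int) lg sg := by
          constructor
          · rintro ⟨hsg, g, hg, hle, hlt, h1, h2⟩
            exact ⟨hsg, g, hg, by omega, hlt, h1, h2⟩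
          · rintro ⟨hsg, g, hg, hle, hlt, h1, h2⟩
            obtain ⟨hg1, hgk, hgev, hgap⟩ := hlgP g hg
            have hne2 : (k : Int) ≠ g + 2 := by
              intro hc
              apply hfire
              subst hg
              simp only [Option.elim_some, Bool.and_eq_true, bne_iff_ne, ne_eq, beq_iff_eq]
              exact ⟨⟨by omega, by omega⟩, hsg⟩
            exact ⟨hsg, g, hg, by omega, hlt, h1, h2⟩
        have hinv' : raInv cs ((k + 1 : Nat) : Int) lg sg cnt lg flag count := by
          refine ⟨rfl, ?_, ?_, ?_⟩
          · rintro g hg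
            obtain ⟨hg1, hgk, hgev, hgap⟩ := hlgP g hg
            refine ⟨hg1, by omega, hgev, ?_⟩
            intro j h1 h2
            by_cases hj : j = (k : Int)
            · subst hj; exact hevF
            · exact hgap j h1 (by omega)
          · intro hp; rw [hcast] at hp; exact hpend1 (hpiff.mp hp)
          · intro hp; rw [hcast] at hp; exact hpend2 (fun h => hp (hpiff.mpr h))
        have := ih (k + 1) (by omega) (by omega) lg lg sg flag cnt count hinv'
        rw [hcast] at this
        rw [this]

theorem repeat_adjacent_spec : Claim_equal_repeat_adjacent := by
  unfold Claim_equal_repeat_adjacent Spec_repeat_adjacent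
  intro st _
  have hA : repeat_adjacent st = raFin ((PySem.List.enumerate
      (PySem.List.slice st.toList (some 1) none) 1).foldl (raStepA st.toList)
      (none, false, 0)) := rfl
  have hB : repeat_adjacent_alt st = raGoB st.toList (st.toList.length : Int)
      ((PySem.List.pyRange 1 (st.toList.length : Int) 1).filter (raEv st.toList))
      none false 0 := rfl
  rw [hA, hB, PySem.List.slice_from_one, ← List.drop_one]
  by_cases h0 : st.toList.length = 0
  · rw [List.length_eq_zero_iff] at h0
    rw [h0]
    simp [raFin, raGoB, PySem.List.enumerate_nil,
      PySem.List.pyRange_one_eq_nil (by norm_num : (0 : Int) ≤ 1)]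
  · have hinv : raInv st.toList ((1 : Nat) : Int) none false 0 none false 0 := by
      refine ⟨rfl, ?_, ?_, ?_⟩
      · rintro g hg; cases hg
      · rintro ⟨_, g, hg, _⟩; cases hg
      · intro _; exact ⟨rfl, rfl⟩
    have := raMain st.toList (st.toList.length - 1) 1 (by omega) le_rfl
      none none false false 0 0 hinv
    simpa using this
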